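-- pv_equiv track=rewrite | github.com/hugobrun343/unet-spleen | scripts/preprocessing/create_stack_dataset.py | get_adjacent_unlabeled_patches
-- ===== SOURCE A (Python) =====
-- def get_adjacent_unlabeled_patches(labeled_patches, empty_patches, vicinity_range=5):
--     """
--     Get unlabeled patches that are adjacent/near to labeled patches
--     Args:
--         labeled_patches: List of labeled patches
--         empty_patches: List of empty patches
--         vicinity_range: Number of slices around labeled patches to consider
--     """
--     # Get slice ranges of labeled patches
--     labeled_slices = set()
--     for patch in labeled_patches:
--         for s in range(patch['start_slice'], patch['end_slice'] + 1):
--             labeled_slices.add(s)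
--
--     # Expand to include vicinity
--     expanded_slices = set()
--     for s in labeled_slices:
--         for offset in range(-vicinity_range, vicinity_range + 1):
--             expanded_slices.add(s + offset)
--
--     # Select empty patches in this vicinity
--     adjacent_empty = []
--     for patch in empty_patches:
--         patch_slice = patch['start_slice']
--         if patch_slice in expanded_slices:
--             adjacent_empty.append(patch)
--
--     return adjacent_empty
-- ===== SOURCE B (Python) =====
-- def get_adjacent_unlabeled_patches(labeled_patches, empty_patches, vicinity_range=5):
--     """Same selection without building slice sets: an empty patch is kept iff its
--     start_slice is within vicinity_range of some slice of some labeled patch,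
--     i.e. iff the intervals [start, end] and [s - v, s + v] intersect."""
--     return [patch for patch in empty_patches
--             if any(max(p['start_slice'], patch['start_slice'] - vicinity_range)
--                    <= min(p['end_slice'], patch['start_slice'] + vicinity_range)
--                    for p in labeled_patches)]
-- ===== Notes on version B (the rewrite author's own statement) =====
-- stated objective: simpler
-- what changed: Replaced the two set-building loops (materialising every labeled slice and then every slice in its vicinity) by a direct one-pass filter that tests interval intersection max(start, s-v) <= min(end, s+v) against each labeled patch.
import Mathlib
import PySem

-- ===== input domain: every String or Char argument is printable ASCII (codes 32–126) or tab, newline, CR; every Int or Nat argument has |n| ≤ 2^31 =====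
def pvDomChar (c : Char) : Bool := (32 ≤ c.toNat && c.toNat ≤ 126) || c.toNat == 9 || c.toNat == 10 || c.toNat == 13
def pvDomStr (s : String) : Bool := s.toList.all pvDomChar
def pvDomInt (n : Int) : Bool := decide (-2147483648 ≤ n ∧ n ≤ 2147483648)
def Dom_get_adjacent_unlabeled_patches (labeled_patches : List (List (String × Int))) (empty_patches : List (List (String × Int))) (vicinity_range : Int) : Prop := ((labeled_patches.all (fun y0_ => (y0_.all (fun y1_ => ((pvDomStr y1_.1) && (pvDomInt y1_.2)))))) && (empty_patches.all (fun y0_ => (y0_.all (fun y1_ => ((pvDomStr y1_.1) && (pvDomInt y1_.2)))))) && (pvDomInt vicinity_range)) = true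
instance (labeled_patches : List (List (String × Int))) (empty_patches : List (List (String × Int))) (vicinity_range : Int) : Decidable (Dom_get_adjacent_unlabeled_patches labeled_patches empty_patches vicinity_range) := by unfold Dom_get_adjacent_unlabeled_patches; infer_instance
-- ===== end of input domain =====

-- B replaces A's two set-building loops by a direct interval-intersection filter (objective: simpler).

-- patch['k'] on the association-list representation of a Python dict: first match.
-- (Pre_ guarantees the key is present, so the `.getD 0` default is never what the Python computes on admitted inputs.)
def pvLookup (patch : List (String × Int)) (k : String) : Int :=
  ((patch.find? (fun kv => kv.1 == k)).map (·.2)).getD 0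

-- ===== PORT A =====
def get_adjacent_unlabeled_patches (labeled_patches : List (List (String × Int))) (empty_patches : List (List (String × Int))) (vicinity_range : Int) : List (List (String × Int)) :=
  -- labeled_slices = set(); for patch: for s in range(start, end+1): add s
  let labeled_slices : PySem.Set Int :=
    labeled_patches.foldl (fun acc patch =>
      PySem.Set.update acc
        (PySem.List.pyRange (pvLookup patch "start_slice") (pvLookup patch "end_slice" + 1) 1))
      PySem.Set.empty
  -- expanded_slices = set(); for s in labeled_slices: for offset in range(-v, v+1): add (s+offset)
  -- (the set's iteration order is irrelevant here: only another set is built from it)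
  let expanded_slices : PySem.Set Int :=
    labeled_slices.foldl (fun acc s =>
      (PySem.List.pyRange (-vicinity_range) (vicinity_range + 1) 1).foldl
        (fun a offset => PySem.Set.add a (s + offset)) acc)
      PySem.Set.empty
  -- adjacent_empty = []; for patch: if patch_slice in expanded_slices: append
  empty_patches.foldl (fun acc patch =>
    if PySem.Set.contains expanded_slices (pvLookup patch "start_slice") then acc ++ [patch] else acc) []

-- ===== PORT B =====
def get_adjacent_unlabeled_patches_alt (labeled_patches : List (List (String × Int))) (empty_patches : List (List (String × Int))) (vicinity_range : Int) : List (List (String × Int)) :=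
  empty_patches.filter (fun patch =>
    labeled_patches.any (fun p =>
      decide (max (pvLookup p "start_slice") (pvLookup patch "start_slice" - vicinity_range)
              ≤ min (pvLookup p "end_slice") (pvLookup patch "start_slice" + vicinity_range))))

-- ===== PRECONDITION & SPEC =====
-- Pre_ excludes exactly the KeyError inputs: every labeled patch must carry
-- 'start_slice' and 'end_slice', every empty patch must carry 'start_slice'.
def Pre_get_adjacent_unlabeled_patches (labeled_patches : List (List (String × Int))) (empty_patches : List (List (String × Int))) (vicinity_range : Int) : Prop :=
  (labeled_patches.all (fun p => (p.find? (fun kv => kv.1 == "start_slice")).isSome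
                              && (p.find? (fun kv => kv.1 == "end_slice")).isSome)
   && empty_patches.all (fun p => (p.find? (fun kv => kv.1 == "start_slice")).isSome)) = true
instance (labeled_patches : List (List (String × Int))) (empty_patches : List (List (String × Int))) (vicinity_range : Int) : Decidable (Pre_get_adjacent_unlabeled_patches labeled_patches empty_patches vicinity_range) := by unfold Pre_get_adjacent_unlabeled_patches; infer_instance

def pvWitness_get_adjacent_unlabeled_patches : (List (List (String × Int))) × (List (List (String × Int))) × Int :=
  ([[("start_slice", 0), ("end_slice", 2)]], [[("start_slice", 4)], [("start_slice", 20)]], 5)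

def Spec_get_adjacent_unlabeled_patches (labeled_patches : List (List (String × Int))) (empty_patches : List (List (String × Int))) (vicinity_range : Int) (out : List (List (String × Int))) : Prop := out = get_adjacent_unlabeled_patches_alt labeled_patches empty_patches vicinity_range
instance (labeled_patches : List (List (String × Int))) (empty_patches : List (List (String × Int))) (vicinity_range : Int) (out : List (List (String × Int))) : Decidable (Spec_get_adjacent_unlabeled_patches labeled_patches empty_patches vicinity_range out) := by unfold Spec_get_adjacent_unlabeled_patches; infer_instance

-- ===== CLAIM (what is proved, stated in full; the proofs are below) =====
def Claim_equal_get_adjacent_unlabeled_patches : Prop := ∀ (labeled_patches : List (List (String × Int))) (empty_patches : List (List (String × Int))) (vicinity_range : Int), Dom_get_adjacent_unlabeled_patches labeled_patches empty_patches vicinity_range → Pre_get_adjacent_unlabeled_patches labeled_patches empty_patches vicinity_range → Spec_get_adjacent_unlabeled_patches labeled_patches empty_patches vicinity_range (get_adjacent_unlabeled_patches labeled_patches empty_patches vicinity_range)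

-- ===== LEMMAS AND PROOFS =====

-- membership in the first set-building loop (a fold of Set.update)
theorem mem_foldl_update {α β : Type} [BEq β] [LawfulBEq β] (l : List α) (g : α → List β)
    (acc : PySem.Set β) (y : β) :
    y ∈ l.foldl (fun acc p => PySem.Set.update acc (g p)) acc ↔ y ∈ acc ∨ ∃ p ∈ l, y ∈ g p := by
  induction l generalizing acc with
  | nil => simp
  | cons h t ih => simp [ih, PySem.Set.mem_update, or_assoc]

-- membership in the second set-building loop (for each s, add s+offset for offsets in the range)
theorem mem_foldl_offsets (l : List Int) (offs : List Int) (acc : PySem.Set Int) (y : Int) :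
    y ∈ l.foldl (fun acc s => offs.foldl (fun a o => PySem.Set.add a (s + o)) acc) acc ↔
      y ∈ acc ∨ ∃ s ∈ l, ∃ o ∈ offs, y = s + o := by
  induction l generalizing acc with
  | nil => simp
  | cons h t ih =>
    simp only [List.foldl_cons, ih, PySem.Set.mem_foldl_add, List.mem_cons]
    constructor
    · rintro (⟨hy | ⟨o, ho, rfl⟩⟩ | ⟨s, hs, o, ho, rfl⟩)
      · exact Or.inl hy
      · exact Or.inr ⟨h, Or.inl rfl, o, ho, rfl⟩
      · exact Or.inr ⟨s, Or.inr hs, o, ho, rfl⟩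
    · rintro (hy | ⟨s, hs | hs, o, ho, rfl⟩)
      · exact Or.inl (Or.inl hy)
      · exact Or.inl (Or.inr ⟨o, ho, by rw [hs]⟩)
      · exact Or.inr ⟨s, hs, o, ho, rfl⟩

-- the characterisation of A's membership test as B's interval intersection
theorem expanded_iff (labeled_patches : List (List (String × Int))) (vicinity_range x : Int) :
    (x ∈ (labeled_patches.foldl (fun acc patch =>
            PySem.Set.update acc
              (PySem.List.pyRange (pvLookup patch "start_slice") (pvLookup patch "end_slice" + 1) 1))
            PySem.Set.empty).foldl (fun acc s =>
              (PySem.List.pyRange (-vicinity_range) (vicinity_range + 1) 1).foldl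
                (fun a offset => PySem.Set.add a (s + offset)) acc)
            PySem.Set.empty) ↔
      ∃ p ∈ labeled_patches,
        max (pvLookup p "start_slice") (x - vicinity_range)
          ≤ min (pvLookup p "end_slice") (x + vicinity_range) := by
  rw [mem_foldl_offsets]
  simp only [PySem.Set.empty, List.not_mem_nil, false_or, mem_foldl_update,
    PySem.List.mem_pyRange_one]
  constructor
  · rintro ⟨s, ⟨p, hp, hs1, hs2⟩, o, ⟨ho1, ho2⟩, rfl⟩
    exact ⟨p, hp, by omega⟩
  · rintro ⟨p, hp, h⟩
    refine ⟨max (pvLookup p "start_slice") (x - vicinity_range), ⟨p, hp, by omega, by omega⟩,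
      x - max (pvLookup p "start_slice") (x - vicinity_range), ⟨by omega, by omega⟩, by omega⟩

-- ===== VERDICT (by name: the statement is the Claim_ definition above) =====
theorem get_adjacent_unlabeled_patches_spec : Claim_equal_get_adjacent_unlabeled_patches := by
  intro labeled_patches empty_patches vicinity_range _ _
  unfold Spec_get_adjacent_unlabeled_patches
  unfold get_adjacent_unlabeled_patches get_adjacent_unlabeled_patches_alt
  rw [PySem.List.foldl_append_if]
  simp only [List.nil_append, List.map_id']
  apply List.filter_congr
  intro patch _
  rw [Bool.eq_iff_iff]
  simp only [PySem.Set.contains_iff, List.any_eq_true, decide_eq_true_eq]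
  exact expanded_iff labeled_patches vicinity_range (pvLookup patch "start_slice")
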